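-- pv_equiv track=rewrite | github.com/xqm32/LeetCode | leetcode/2023.9.20.py | numSubarrayBoundedMax
-- ===== SOURCE A (Python) =====
-- from typing import List
--
-- def numSubarrayBoundedMax(nums: List[int], left: int, right: int) -> int:
--     def count(bound):
--         ans = cur = 0
--         for num in nums:
--             cur = cur + 1 if num <= bound else 0
--             ans += cur
--         return ans
--
--     return count(right) - count(left - 1)
-- ===== SOURCE B (Python) =====
-- def numSubarrayBoundedMax(nums, left, right):
--     ans = 0
--     prev = last = -1  # prev: last index with num > right; last: last index with num >= left
--     for i, n in enumerate(nums):
--         if n > right: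
--             prev = i
--         if n >= left:
--             last = i
--         ans += last - prev
--     return ans
-- ===== Notes on version B (the rewrite author's own statement) =====
-- stated objective: faster
-- what changed: Replaces A's two count(bound) passes and their subtraction with a single sweep that maintains the last index with num > right and the last index with num >= left and adds their gap last - prev per position, accumulating the answer directly in one pass.
import Mathlib
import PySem

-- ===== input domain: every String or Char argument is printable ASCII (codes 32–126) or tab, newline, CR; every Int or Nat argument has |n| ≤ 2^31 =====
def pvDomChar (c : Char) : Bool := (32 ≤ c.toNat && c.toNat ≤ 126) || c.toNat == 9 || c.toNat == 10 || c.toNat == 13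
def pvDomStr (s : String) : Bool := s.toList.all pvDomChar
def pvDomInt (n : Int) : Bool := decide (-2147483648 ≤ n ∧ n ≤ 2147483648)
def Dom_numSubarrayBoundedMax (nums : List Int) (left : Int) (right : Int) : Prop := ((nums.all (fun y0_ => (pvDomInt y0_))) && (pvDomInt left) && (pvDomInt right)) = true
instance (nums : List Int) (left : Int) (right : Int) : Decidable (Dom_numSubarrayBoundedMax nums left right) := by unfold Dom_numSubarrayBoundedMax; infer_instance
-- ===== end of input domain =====

-- B replaces A's two count(bound) passes and their subtraction with one pointer sweep
-- (last index > right, last index >= left) accumulating the gap per position; same return value.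

-- ===== PORT A =====
-- A's inner closure `count(bound)`: loop over nums carrying (ans, cur)
def countGo (bound : Int) : List Int → Int → Int → Int
  | [], ans, _ => ans
  | n :: t, ans, cur =>
    let cur' := if n ≤ bound then cur + 1 else 0
    countGo bound t (ans + cur') cur'

def numSubarrayBoundedMax (nums : List Int) (left : Int) (right : Int) : Int :=
  countGo right nums 0 0 - countGo (left - 1) nums 0 0

-- ===== PORT B =====
-- B's loop: index i, prev = last index with n > right, last = last index with n ≥ left
def altGo (left right : Int) : List Int → Int → Int → Int → Int → Int
  | [], _, _, _, ans => ans
  | n :: t, i, prev, last, ans =>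
    let prev' := if right < n then i else prev
    let last' := if left ≤ n then i else last
    altGo left right t (i + 1) prev' last' (ans + (last' - prev'))

def numSubarrayBoundedMax_alt (nums : List Int) (left : Int) (right : Int) : Int :=
  altGo left right nums 0 (-1) (-1) 0

-- ===== PRECONDITION & SPEC =====
def Spec_numSubarrayBoundedMax (nums : List Int) (left : Int) (right : Int) (out : Int) : Prop := out = numSubarrayBoundedMax_alt nums left right
instance (nums : List Int) (left : Int) (right : Int) (out : Int) : Decidable (Spec_numSubarrayBoundedMax nums left right out) := by unfold Spec_numSubarrayBoundedMax; infer_instance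

-- ===== CLAIM (what is proved, stated in full; the proofs are below) =====
def Claim_equal_numSubarrayBoundedMax : Prop := ∀ (nums : List Int) (left : Int) (right : Int), Dom_numSubarrayBoundedMax nums left right → Spec_numSubarrayBoundedMax nums left right (numSubarrayBoundedMax nums left right)

-- ===== LEMMAS AND PROOFS =====

-- shift the accumulated answer out of countGo
theorem countGo_shift (bound : Int) (t : List Int) (a c : Int) :
    countGo bound t a c = a + countGo bound t 0 c := by
  induction t generalizing a c with
  | nil => simp [countGo]
  | cons n t ih =>
    simp only [countGo]
    rw [ih, ih (0 + _)]
    ring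

-- loop invariant: at position i the run length of trailing elements ≤ right is i - 1 - prev
-- and the run length of trailing elements ≤ left - 1 is i - 1 - last; then B's remaining
-- sweep equals the difference of A's two remaining counts.
theorem altGo_eq (left right : Int) (t : List Int) :
    ∀ (i prev last a : Int),
      altGo left right t i prev last a
        = a + countGo right t 0 (i - 1 - prev) - countGo (left - 1) t 0 (i - 1 - last) := by
  induction t with
  | nil => intro i prev last a; simp [altGo, countGo]
  | cons n t ih =>
    intro i prev last a
    simp only [altGo, countGo]
    rw [ih]
    rw [countGo_shift right t (0 + _), countGo_shift (left - 1) t (0 + _)]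
    by_cases hr : right < n <;> by_cases hn : left ≤ n
    · rw [if_pos hr, if_pos hn, if_neg (show ¬ n ≤ right by omega),
        if_neg (show ¬ n ≤ left - 1 by omega),
        show i + 1 - 1 - i = (0 : Int) by ring]
      ring
    · rw [if_pos hr, if_neg hn, if_neg (show ¬ n ≤ right by omega),
        if_pos (show n ≤ left - 1 by omega),
        show i + 1 - 1 - i = (0 : Int) by ring,
        show i + 1 - 1 - last = i - 1 - last + 1 by ring]
      ring
    · rw [if_neg hr, if_pos hn, if_pos (show n ≤ right by omega),
        if_neg (show ¬ n ≤ left - 1 by omega),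
        show i + 1 - 1 - i = (0 : Int) by ring,
        show i + 1 - 1 - prev = i - 1 - prev + 1 by ring]
      ring
    · rw [if_neg hr, if_neg hn, if_pos (show n ≤ right by omega),
        if_pos (show n ≤ left - 1 by omega),
        show i + 1 - 1 - prev = i - 1 - prev + 1 by ring,
        show i + 1 - 1 - last = i - 1 - last + 1 by ring]
      ring

-- ===== VERDICT (by name: the statement is the Claim_ definition above) =====
theorem numSubarrayBoundedMax_spec : Claim_equal_numSubarrayBoundedMax := by
  intro nums left right _
  unfold Spec_numSubarrayBoundedMax numSubarrayBoundedMax numSubarrayBoundedMax_alt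
  rw [altGo_eq left right nums 0 (-1) (-1) 0]
  norm_num
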